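-- pv_equiv track=rewrite | github.com/AdityaJain1030/K4-free-graph-constructions | search/algebraic_explicit/norm_graph.py | _norm_kernel_conn_set
-- ===== SOURCE A (Python) =====
-- def _norm_kernel_conn_set(q: int) -> list[int]:
--     """
--     Connection set for Cayley on Z_{q²-1} = image of norm-kernel in the
--     cyclic group. Symmetric (closed under negation) because −1 sits in
--     the kernel for every q ≥ 2.
--     """
--     n = q * q - 1
--     base = q - 1
--     S = set()
--     for k in range(1, q + 1):
--         j = (base * k) % n
--         if j == 0:
--             continue
--         S.add(j)
--         S.add((-j) % n)  # enforce symmetry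
--     return sorted(S)
-- ===== SOURCE B (Python) =====
-- def _norm_kernel_conn_set(q: int) -> list[int]:
--     # For k = 1..q the multiple (q-1)*k already lies in [0, q*q-1) and the
--     # negated copies reproduce the same multiples, so the symmetric set is
--     # exactly the increasing arithmetic progression of multiples of q-1.
--     n = q * q - 1
--     return [(q - 1) * k % n for k in range(1, q + 1)]
-- ===== Notes on version B (the rewrite author's own statement) =====
-- stated objective: simpler
-- what changed: Replaces the set-accumulation with explicit negation symmetry and a final sort by a direct closed-form construction: the result is just the increasing progression of multiples of q-1 reduced mod q*q-1, built in one list comprehension with no set and no sort.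
import Mathlib
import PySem

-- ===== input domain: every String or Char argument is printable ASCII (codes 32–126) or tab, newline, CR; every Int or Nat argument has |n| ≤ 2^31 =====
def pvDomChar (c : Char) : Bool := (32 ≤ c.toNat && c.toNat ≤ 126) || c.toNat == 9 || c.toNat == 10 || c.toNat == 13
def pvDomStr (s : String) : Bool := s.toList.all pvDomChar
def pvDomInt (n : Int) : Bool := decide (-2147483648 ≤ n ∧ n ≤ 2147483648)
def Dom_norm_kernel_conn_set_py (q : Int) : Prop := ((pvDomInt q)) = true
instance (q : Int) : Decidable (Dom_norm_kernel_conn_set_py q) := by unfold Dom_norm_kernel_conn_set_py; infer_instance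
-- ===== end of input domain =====

-- B replaces A's set accumulation + explicit negation symmetry + sort by the direct
-- closed-form increasing progression of multiples of q-1 reduced mod q*q-1 (objective: simpler).

-- ===== PORT A =====
-- loop body of A: j = (base*k) % n; skip j == 0; S.add(j); S.add((-j) % n)
def pvStepA (q : Int) (S : PySem.Set Int) (k : Int) : PySem.Set Int :=
  let n := q * q - 1
  let base := q - 1
  let j := PySem.Int.mod (base * k) n
  if j = 0 then S
  else PySem.Set.add (PySem.Set.add S j) (PySem.Int.mod (-j) n)

def norm_kernel_conn_set_py (q : Int) : List Int :=
  let S : PySem.Set Int :=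
    (PySem.List.pyRange 1 (q + 1) 1).foldl (pvStepA q) PySem.Set.empty
  PySem.List.sorted S (fun x => x) false

-- ===== PORT B =====
def norm_kernel_conn_set_py_alt (q : Int) : List Int :=
  let n := q * q - 1
  (PySem.List.pyRange 1 (q + 1) 1).map (fun k => PySem.Int.mod ((q - 1) * k) n)

-- ===== PRECONDITION & SPEC =====
-- Pre_ excludes exactly q = 1, where n = 0 and Python's '% n' raises ZeroDivisionError.
def Pre_norm_kernel_conn_set_py (q : Int) : Prop := q ≠ 1
instance (q : Int) : Decidable (Pre_norm_kernel_conn_set_py q) := by unfold Pre_norm_kernel_conn_set_py; infer_instance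
def pvWitness_norm_kernel_conn_set_py : Int := 3

def Spec_norm_kernel_conn_set_py (q : Int) (out : List Int) : Prop := out = norm_kernel_conn_set_py_alt q
instance (q : Int) (out : List Int) : Decidable (Spec_norm_kernel_conn_set_py q out) := by unfold Spec_norm_kernel_conn_set_py; infer_instance

-- ===== CLAIM (what is proved, stated in full; the proofs are below) =====
def Claim_equal_norm_kernel_conn_set_py : Prop := ∀ (q : Int), Dom_norm_kernel_conn_set_py q → Pre_norm_kernel_conn_set_py q → Spec_norm_kernel_conn_set_py q (norm_kernel_conn_set_py q)

-- ===== LEMMAS AND PROOFS =====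

-- for 1 ≤ k ≤ q (q ≥ 2) the two mods are no-ops: the step adds (q-1)*k and (q-1)*(q+1-k)
lemma pvStepA_eq (q k : Int) (hq : 2 ≤ q) (h1 : 1 ≤ k) (h2 : k ≤ q) (S : PySem.Set Int) :
    pvStepA q S k = PySem.Set.add (PySem.Set.add S ((q - 1) * k)) ((q - 1) * (q + 1 - k)) := by
  have hn : (0 : Int) < q * q - 1 := by nlinarith
  have hj0 : (0 : Int) < (q - 1) * k := by
    have := mul_pos (by omega : (0:Int) < q - 1) (by omega : (0:Int) < k); linarith
  have hjlt : (q - 1) * k < q * q - 1 := by nlinarith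
  unfold pvStepA
  simp only [PySem.Int.mod_eq_emod_of_pos hn]
  rw [Int.emod_eq_of_lt (le_of_lt hj0) hjlt]
  rw [if_neg (by omega : ¬ (q - 1) * k = 0)]
  have h3 : -((q - 1) * k) = ((q * q - 1) - (q - 1) * k) + (q * q - 1) * (-1) := by ring
  rw [h3, Int.add_mul_emod_self_left,
      Int.emod_eq_of_lt (by linarith) (by linarith)]
  congr 1
  ring

lemma pvLoopA_mem (q : Int) (hq : 2 ≤ q) :
    ∀ (m : Nat) (a : Int), 1 ≤ a → (q + 1 - a).toNat = m →
      ∀ (S₀ : PySem.Set Int) (x : Int),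
        (x ∈ (PySem.List.pyRange a (q + 1) 1).foldl (pvStepA q) S₀ ↔
          x ∈ S₀ ∨ ∃ k, a ≤ k ∧ k ≤ q ∧ (x = (q - 1) * k ∨ x = (q - 1) * (q + 1 - k))) := by
  intro m
  induction m with
  | zero =>
      intro a ha hm S₀ x
      rw [PySem.List.pyRange_one_eq_nil (by omega)]
      simp only [List.foldl_nil]
      constructor
      · intro h; exact Or.inl h
      · rintro (h | ⟨k, hk1, hk2, _⟩); · exact h
        · omega
  | succ m ih =>
      intro a ha hm S₀ x
      have hab : a < q + 1 := by omega
      rw [PySem.List.pyRange_one_cons hab]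
      simp only [List.foldl_cons]
      rw [pvStepA_eq q a hq ha (by omega)]
      rw [ih (a + 1) (by omega) (by omega)]
      simp only [PySem.Set.mem_add]
      constructor
      · rintro ((h | h) | ⟨k, hk1, hk2, hk3⟩)
        · rcases h with h | h
          · exact Or.inl h
          · exact Or.inr ⟨a, le_refl a, by omega, Or.inl h⟩
        · exact Or.inr ⟨a, le_refl a, by omega, Or.inr h⟩
        · exact Or.inr ⟨k, by omega, hk2, hk3⟩
      · rintro (h | ⟨k, hk1, hk2, hk3⟩)
        · exact Or.inl (Or.inl (Or.inl h))
        · rcases eq_or_lt_of_le hk1 with h | h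
          · subst h
            rcases hk3 with h | h
            · exact Or.inl (Or.inl (Or.inr h))
            · exact Or.inl (Or.inr h)
          · exact Or.inr ⟨k, by omega, hk2, hk3⟩

lemma pvLoopA_nodup (q : Int) (hq : 2 ≤ q) :
    ∀ (m : Nat) (a : Int), 1 ≤ a → (q + 1 - a).toNat = m →
      ∀ (S₀ : PySem.Set Int), S₀.Nodup →
        ((PySem.List.pyRange a (q + 1) 1).foldl (pvStepA q) S₀).Nodup := by
  intro m
  induction m with
  | zero =>
      intro a ha hm S₀ hS
      rw [PySem.List.pyRange_one_eq_nil (by omega)]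
      simpa using hS
  | succ m ih =>
      intro a ha hm S₀ hS
      rw [PySem.List.pyRange_one_cons (by omega)]
      simp only [List.foldl_cons]
      rw [pvStepA_eq q a hq ha (by omega)]
      exact ih (a + 1) (by omega) (by omega) _
        (PySem.Set.nodup_add _ _ (PySem.Set.nodup_add _ _ hS))

-- main equality for q ≥ 2
lemma pv_eq_of_two_le (q : Int) (hq : 2 ≤ q) :
    norm_kernel_conn_set_py q = norm_kernel_conn_set_py_alt q := by
  have hn : (0 : Int) < q * q - 1 := by nlinarith
  -- B is the plain progression of multiples of q-1
  have hB : norm_kernel_conn_set_py_alt q =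
      (PySem.List.pyRange 1 (q + 1) 1).map (fun k => (q - 1) * k) := by
    unfold norm_kernel_conn_set_py_alt
    refine List.map_congr_left (fun k hk => ?_)
    rw [PySem.List.mem_pyRange_one] at hk
    have hj0 : (0 : Int) ≤ (q - 1) * k := by
      have := mul_pos (by omega : (0:Int) < q - 1) (by omega : (0:Int) < k); linarith
    have hjlt : (q - 1) * k < q * q - 1 := by nlinarith
    rw [PySem.Int.mod_eq_emod_of_pos hn, Int.emod_eq_of_lt hj0 hjlt]
  set L : List Int := (PySem.List.pyRange 1 (q + 1) 1).map (fun k => (q - 1) * k) with hL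
  set S : PySem.Set Int :=
    (PySem.List.pyRange 1 (q + 1) 1).foldl (pvStepA q) PySem.Set.empty with hSdef
  have hinj : Function.Injective (fun k : Int => (q - 1) * k) :=
    mul_right_injective₀ (by omega : (q : Int) - 1 ≠ 0)
  have hLnodup : L.Nodup := (PySem.List.nodup_pyRange_one 1 (q + 1)).map hinj
  have hSnodup : S.Nodup :=
    pvLoopA_nodup q hq (q + 1 - 1).toNat 1 (by omega) rfl PySem.Set.empty List.nodup_nil
  have hmem : ∀ x, x ∈ L ↔ x ∈ S := by
    intro x
    rw [hSdef, pvLoopA_mem q hq (q + 1 - 1).toNat 1 (by omega) rfl]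
    simp only [hL, List.mem_map, PySem.List.mem_pyRange_one, PySem.Set.empty,
      List.not_mem_nil, false_or]
    constructor
    · rintro ⟨k, ⟨hk1, hk2⟩, hk3⟩
      exact ⟨k, hk1, by omega, Or.inl hk3.symm⟩
    · rintro ⟨k, hk1, hk2, h | h⟩
      · exact ⟨k, ⟨hk1, by omega⟩, h.symm⟩
      · exact ⟨q + 1 - k, ⟨by omega, by omega⟩, h.symm⟩
  have hperm : L.Perm S := (List.perm_ext_iff_of_nodup hLnodup hSnodup).mpr hmem
  have hpw : L.Pairwise (fun a b => (fun x : Int => x) a < (fun x : Int => x) b) := by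
    refine List.Pairwise.map _ (fun a b hab => ?_)
      (PySem.List.pairwise_lt_pyRange_one 1 (q + 1))
    exact mul_lt_mul_of_pos_left hab (by omega)
  have : PySem.List.sorted S (fun x : Int => x) false = L :=
    PySem.List.sorted_eq_of_perm_of_pairwise_lt S L (fun x : Int => x) hperm hpw
  rw [hB]
  unfold norm_kernel_conn_set_py
  exact this

-- ===== VERDICT (by name: the statement is the Claim_ definition above) =====
theorem norm_kernel_conn_set_py_spec : Claim_equal_norm_kernel_conn_set_py := by
  intro q _ hpre
  unfold Spec_norm_kernel_conn_set_py
  by_cases hq : 2 ≤ q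
  · exact pv_eq_of_two_le q hq
  · have hq0 : q ≤ 0 := by
      rcases (by omega : q < 1 ∨ q = 1) with h | h
      · omega
      · exact absurd h hpre
    have hnil : PySem.List.pyRange 1 (q + 1) 1 = [] :=
      PySem.List.pyRange_one_eq_nil (by omega)
    unfold norm_kernel_conn_set_py norm_kernel_conn_set_py_alt
    rw [hnil]
    rfl
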